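-- pv_equiv track=rewrite | github.com/Kimiwasadat/icscalenderconverter | app.py | strip_header_weekdays
-- ===== SOURCE A (Python) =====
-- def strip_header_weekdays(desc):
--     weekdays = ['monday', 'tuesday', 'wednesday', 'thursday', 'friday', 'saturday', 'sunday']
--     parts = desc.split()
--     result = []
--     skipping = True
--     for part in parts:
--         lowered = part.lower().strip(',-–')
--         if skipping and (lowered in weekdays or lowered in ['-', '–']):
--             continue
--         else:
--             skipping = False
--             result.append(part)
--     return ' '.join(result)
-- ===== SOURCE B (Python) =====
-- def strip_header_weekdays(desc):
--     weekdays = ['monday', 'tuesday', 'wednesday', 'thursday', 'friday', 'saturday', 'sunday']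
--     parts = desc.split()
--     def skippable(part):
--         lowered = part.lower().strip(',-–')
--         return lowered in weekdays or lowered in ['-', '–']
--     flags = [skippable(p) for p in parts]
--     i = flags.index(False) if False in flags else len(parts)
--     return ' '.join(parts[i:])
-- ===== Notes on version B (the rewrite author's own statement) =====
-- stated objective: alternative
-- what changed: Replaces A's skipping-flag fold that rebuilds a result list with staged passes: first map the skippability predicate over all tokens into a flags list, then locate the boundary with flags.index(False), then join the untouched tail slice parts[i:].
import Mathlib
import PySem

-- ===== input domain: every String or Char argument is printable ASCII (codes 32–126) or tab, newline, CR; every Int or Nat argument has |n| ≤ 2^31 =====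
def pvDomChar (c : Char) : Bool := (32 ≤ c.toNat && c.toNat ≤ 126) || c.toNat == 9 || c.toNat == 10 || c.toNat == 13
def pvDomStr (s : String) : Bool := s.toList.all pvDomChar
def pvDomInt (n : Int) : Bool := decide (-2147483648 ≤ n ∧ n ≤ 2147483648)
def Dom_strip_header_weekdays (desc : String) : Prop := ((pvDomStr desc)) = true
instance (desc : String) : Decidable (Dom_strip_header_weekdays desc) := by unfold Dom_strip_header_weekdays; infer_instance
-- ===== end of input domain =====

-- B replaces A's skipping-flag fold (rebuilding a result list) with staged passes: map a
-- skippability flag over every token, find the first False with index, join the tail slice.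

-- ===== PORT A =====
-- shared Python constant: the weekday list
def pvWeekdays : List String :=
  ["monday", "tuesday", "wednesday", "thursday", "friday", "saturday", "sunday"]

-- part.lower().strip(',-–')
def pvLowered (part : String) : String :=
  PySem.Str.stripChars (PySem.Str.lower part) ",-–"

-- A's loop: state (skipping, result), branches in source order
def pvLoopA : List String → Bool → List String → List String
  | [], _, result => result
  | part :: rest, skipping, result =>
      if skipping && (pvWeekdays.contains (pvLowered part) || ["-", "–"].contains (pvLowered part)) then
        pvLoopA rest skipping result
      else
        pvLoopA rest false (result ++ [part])

def strip_header_weekdays (desc : String) : String :=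
  PySem.Str.join " " (pvLoopA (PySem.Str.split₀ desc) true [])

-- ===== PORT B =====
-- B's local helper 'skippable(part)'
def pvSkippable (part : String) : Bool :=
  pvWeekdays.contains (pvLowered part) || ["-", "–"].contains (pvLowered part)

def strip_header_weekdays_alt (desc : String) : String :=
  let parts := PySem.Str.split₀ desc
  let flags := parts.map pvSkippable
  let i : Nat := if flags.contains false then
      (PySem.List.index? flags false).getD parts.length
    else parts.length
  PySem.Str.join " " (PySem.List.slice parts (some (i : Int)) none)

-- ===== PRECONDITION & SPEC =====
def Spec_strip_header_weekdays (desc : String) (out : String) : Prop := out = strip_header_weekdays_alt desc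
instance (desc : String) (out : String) : Decidable (Spec_strip_header_weekdays desc out) := by unfold Spec_strip_header_weekdays; infer_instance

-- ===== CLAIM =====
def Claim_equal_strip_header_weekdays : Prop := ∀ (desc : String), Dom_strip_header_weekdays desc → Spec_strip_header_weekdays desc (strip_header_weekdays desc)

-- ===== LEMMAS AND PROOFS =====
-- once skipping is False, A appends every remaining part
theorem pvLoopA_false (parts acc : List String) : pvLoopA parts false acc = acc ++ parts := by
  induction parts generalizing acc with
  | nil => simp [pvLoopA]
  | cons p ps ih => simp [pvLoopA, ih]

-- B's boundary index as a function of the token list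
def pvIdxB (parts : List String) : Nat :=
  if (parts.map pvSkippable).contains false then
    (PySem.List.index? (parts.map pvSkippable) false).getD parts.length
  else parts.length

theorem pvIdxB_cons_skip (p : String) (ps : List String) (h : pvSkippable p = true) :
    pvIdxB (p :: ps) = pvIdxB ps + 1 := by
  unfold pvIdxB
  rcases hk : PySem.List.index? (ps.map pvSkippable) false with _ | k
  · have hnm : false ∉ ps.map pvSkippable := (PySem.List.index?_eq_none_iff _ _).mp hk
    have hc : (ps.map pvSkippable).contains false = false := by
      simp [List.contains_eq_mem, hnm]
    rw [List.map_cons, h]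
    simp [List.contains_eq_mem, hnm]
  · have hm : false ∈ ps.map pvSkippable :=
      (PySem.List.index?_isSome_iff _ _).mp (by rw [hk]; rfl)
    rw [List.map_cons, h]
    rw [PySem.List.index?_cons_of_ne (List.map pvSkippable ps) (by decide : (true : Bool) ≠ false), hk]
    simp [List.contains_eq_mem, hm]

theorem pvIdxB_cons_stop (p : String) (ps : List String) (h : pvSkippable p = false) :
    pvIdxB (p :: ps) = 0 := by
  unfold pvIdxB
  rw [List.map_cons, h, PySem.List.index?_cons_self]
  simp

-- A's loop from the initial state drops exactly B's boundary prefix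
theorem pvLoopA_eq_drop (parts : List String) :
    pvLoopA parts true [] = parts.drop (pvIdxB parts) := by
  induction parts with
  | nil => rfl
  | cons p ps ih =>
      by_cases h : pvSkippable p = true
      · have hA : pvLoopA (p :: ps) true [] = pvLoopA ps true [] := by
          have h' := h
          simp [pvSkippable] at h'
          rcases h' with h' | h' <;> simp [pvLoopA, h']
        rw [hA, ih, pvIdxB_cons_skip p ps h, List.drop_succ_cons]
      · have hp : pvSkippable p = false := by simpa using h
        have h' := h
        simp [pvSkippable] at h'
        have hA : pvLoopA (p :: ps) true [] = p :: ps := by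
          simp [pvLoopA, h'.1, h'.2, pvLoopA_false]
        rw [hA, pvIdxB_cons_stop p ps hp, List.drop_zero]

-- ===== VERDICT =====
theorem strip_header_weekdays_spec : Claim_equal_strip_header_weekdays := by
  intro desc _
  unfold Spec_strip_header_weekdays strip_header_weekdays
  show PySem.Str.join " " (pvLoopA (PySem.Str.split₀ desc) true []) =
       PySem.Str.join " " (PySem.List.slice (PySem.Str.split₀ desc)
         (some ((pvIdxB (PySem.Str.split₀ desc) : Nat) : Int)) none)
  rw [PySem.List.slice_from_natCast, pvLoopA_eq_drop]
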